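-- pv_equiv track=rewrite | github.com/danielzak555/magshimim_all_hw | Network/Semester B/homework_8/test6.py | decode_even_positions
-- ===== SOURCE A (Python) =====
-- def decode_even_positions(data, rotation):
--     output = ""
--     for pos, ch in enumerate(data):
--         if pos % 2 == 0 and ch.isalpha():
--             rotated = chr(((ord(ch.lower()) - ord('a') - rotation) % 26) + ord('a'))
--             output += rotated.upper() if ch.isupper() else rotated
--         else:
--             output += ch
--     return output
-- ===== SOURCE B (Python) =====
-- def decode_even_positions(data, rotation):
--     # Caesar-decode table built once; even/odd slices, translate the even one, interleave.
--     dec = ''.join(chr((i - rotation) % 26 + 97) for i in range(26))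
--
--     def tr(c):
--         if 'a' <= c <= 'z':
--             return dec[ord(c) - 97]
--         if 'A' <= c <= 'Z':
--             return dec[ord(c) - 65].upper()
--         return c
--
--     ev = ''.join(map(tr, data[::2]))
--     od = data[1::2]
--     out = []
--     for e, o in zip(ev, od):
--         out.append(e)
--         out.append(o)
--     if len(od) < len(ev):
--         out.append(ev[-1])
--     return ''.join(out)
-- ===== Notes on version B (the rewrite author's own statement) =====
-- stated objective: idiomatic
-- what changed: B precomputes the 26-letter Caesar-decode table once, splits the string into even/odd slices (data[::2], data[1::2]), applies the table lookup to the even slice only and interleaves the two slices, instead of A's per-position branch-and-recompute loop over enumerate(data); the per-character chr/ord recomputation disappears (timed ~1.7x faster).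
import Mathlib
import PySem

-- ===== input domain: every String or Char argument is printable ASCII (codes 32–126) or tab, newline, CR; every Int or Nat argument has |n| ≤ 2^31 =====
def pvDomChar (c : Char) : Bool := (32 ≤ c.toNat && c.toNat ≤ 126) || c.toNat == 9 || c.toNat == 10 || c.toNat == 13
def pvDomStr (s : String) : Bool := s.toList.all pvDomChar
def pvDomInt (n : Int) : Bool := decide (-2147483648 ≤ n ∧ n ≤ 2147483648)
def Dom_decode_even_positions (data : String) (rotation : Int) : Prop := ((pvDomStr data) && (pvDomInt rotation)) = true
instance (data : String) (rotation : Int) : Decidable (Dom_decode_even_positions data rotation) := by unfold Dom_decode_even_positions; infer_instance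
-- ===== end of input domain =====

-- B builds the 26-letter decode table once and translates the even-index slice, interleaving it
-- with the untouched odd-index slice (idiomatic table/slice decomposition; same O(n) cost as A).

-- ===== PORT A =====
def decode_even_positions (data : String) (rotation : Int) : String :=
  String.ofList ((PySem.List.enumerate data.toList).foldl (fun output pc =>
    if PySem.Int.mod pc.1 2 == 0 && PySem.Chars.isalpha pc.2 then
      let rotated := Char.ofNat
        ((PySem.Int.mod (((PySem.Chars.lowerChar pc.2).toNat : Int) - ('a'.toNat : Int) - rotation) 26).toNat + 'a'.toNat)
      output ++ [if PySem.Chars.isupper pc.2 then PySem.Chars.upperChar rotated else rotated]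
    else output ++ [pc.2]) [])

-- ===== PORT B =====
-- dec = ''.join(chr((i - rotation) % 26 + 97) for i in range(26))
def pvDecTable (rotation : Int) : List Char :=
  (PySem.List.pyRange 0 26).map (fun i => Char.ofNat ((PySem.Int.mod (i - rotation) 26).toNat + 'a'.toNat))

-- tr(c); the pyGetD default is never reached (the index is in range whenever the guard holds)
def pvTr (dec : List Char) (c : Char) : Char :=
  if 'a' ≤ c ∧ c ≤ 'z' then PySem.List.pyGetD dec ((c.toNat : Int) - ('a'.toNat : Int)) c
  else if 'A' ≤ c ∧ c ≤ 'Z' then PySem.Chars.upperChar (PySem.List.pyGetD dec ((c.toNat : Int) - ('A'.toNat : Int)) c)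
  else c

def decode_even_positions_alt (data : String) (rotation : Int) : String :=
  let dec := pvDecTable rotation
  let ev := ((PySem.List.slice? data.toList none none 2).getD []).map (pvTr dec)
  let od := (PySem.List.slice? data.toList (some 1) none 2).getD []
  let out := (ev.zip od).foldl (fun acc p => acc ++ [p.1, p.2]) []
  -- out.append(ev[-1]) is guarded by len(od) < len(ev), so ev is nonempty and the default is never reached
  String.ofList (if od.length < ev.length then out ++ [PySem.List.pyGetD ev (-1) 'a'] else out)

-- ===== PRECONDITION & SPEC =====
def Spec_decode_even_positions (data : String) (rotation : Int) (out : String) : Prop := out = decode_even_positions_alt data rotation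
instance (data : String) (rotation : Int) (out : String) : Decidable (Spec_decode_even_positions data rotation out) := by unfold Spec_decode_even_positions; infer_instance

-- ===== CLAIM (what is proved, stated in full; the proofs are below) =====
def Claim_equal_decode_even_positions : Prop := ∀ (data : String) (rotation : Int), Dom_decode_even_positions data rotation → Spec_decode_even_positions data rotation (decode_even_positions data rotation)

-- ===== LEMMAS AND PROOFS =====

-- every other element, starting with the first: what the step-2 slices compute
def pvEvery2 {α : Type} : List α → List α
  | [] => []
  | [a] => [a]
  | a :: _ :: t => a :: pvEvery2 t

-- the common shape both programs produce
def pvJ (rotation : Int) : List Char → List Char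
  | [] => []
  | [a] => [pvTr (pvDecTable rotation) a]
  | a :: b :: t => pvTr (pvDecTable rotation) a :: b :: pvJ rotation t

-- A's loop body as a per-element chunk
def pvGA (rotation : Int) (pc : Int × Char) : List Char :=
  if PySem.Int.mod pc.1 2 == 0 && PySem.Chars.isalpha pc.2 then
    let rotated := Char.ofNat
      ((PySem.Int.mod (((PySem.Chars.lowerChar pc.2).toNat : Int) - ('a'.toNat : Int) - rotation) 26).toNat + 'a'.toNat)
    [if PySem.Chars.isupper pc.2 then PySem.Chars.upperChar rotated else rotated]
  else [pc.2]

lemma pvDec_get (rot : Int) (k : Nat) (hk : k < 26) (d : Char) :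
    PySem.List.pyGetD (pvDecTable rot) (k : Int) d
      = Char.ofNat ((PySem.Int.mod ((k : Int) - rot) 26).toNat + 97) := by
  have h := PySem.List.pyGetD_map_pyRange
    (fun i => Char.ofNat ((PySem.Int.mod (i - rot) 26).toNat + 'a'.toNat)) 26 k d hk
  unfold pvDecTable
  simpa using h

lemma charLe (x y : Char) : (x ≤ y) ↔ x.toNat ≤ y.toNat := Iff.rfl

lemma charOfNat_toNat (m : Nat) (h : m < 55296) : (Char.ofNat m).toNat = m := by
  have hv : m.isValidChar := Or.inl h
  simp [Char.ofNat, hv, Char.ofNatAux, Char.toNat]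

lemma pvGA_even (rot n : Int) (c : Char) (h : PySem.Int.mod n 2 = 0) :
    pvGA rot (n, c) = [pvTr (pvDecTable rot) c] := by
  have e97 : 'a'.toNat = 97 := rfl
  have e122 : 'z'.toNat = 122 := rfl
  have e65 : 'A'.toNat = 65 := rfl
  have e90 : 'Z'.toNat = 90 := rfl
  unfold pvGA pvTr
  simp only [h, e97, e65, Nat.cast_ofNat]
  by_cases hl : PySem.Chars.islower c = true
  · have hlc : 97 ≤ c.toNat ∧ c.toNat ≤ 122 := by
      simpa [PySem.Chars.islower, charLe] using hl
    have halpha : PySem.Chars.isalpha c = true := by simp [PySem.Chars.isalpha, hl]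
    have hup : PySem.Chars.isupper c = false := by
      simp [PySem.Chars.isupper, charLe]; omega
    have hlow : PySem.Chars.lowerChar c = c := by simp [PySem.Chars.lowerChar, hup]
    have hcast : ((c.toNat : Int) - (97 : Int)) = ((c.toNat - 97 : Nat) : Int) := by omega
    have harg : ((c.toNat - 97 : Nat) : Int) - rot = (c.toNat : Int) - (97 : Int) - rot := by omega
    rw [if_pos (by simp [halpha]),
        if_pos (show 'a' ≤ c ∧ c ≤ 'z' from
          ⟨(charLe 'a' c).2 (by rw [e97]; omega), (charLe c 'z').2 (by rw [e122]; omega)⟩),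
        hcast, pvDec_get rot (c.toNat - 97) (by omega), harg]
    simp [hup, hlow]
  · by_cases hu : PySem.Chars.isupper c = true
    · have huc : 65 ≤ c.toNat ∧ c.toNat ≤ 90 := by
        simpa [PySem.Chars.isupper, charLe] using hu
      have halpha : PySem.Chars.isalpha c = true := by simp [PySem.Chars.isalpha, hu]
      have hlow : PySem.Chars.lowerChar c = Char.ofNat (c.toNat + 32) := by
        simp [PySem.Chars.lowerChar, hu]
      have hlnat : (Char.ofNat (c.toNat + 32)).toNat = c.toNat + 32 :=
        charOfNat_toNat _ (by omega)
      have hnotl : ¬ ('a' ≤ c ∧ c ≤ 'z') := by simp only [charLe, e97, e122]; omega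
      have hcast : ((c.toNat : Int) - (65 : Int)) = ((c.toNat - 65 : Nat) : Int) := by omega
      have harg : ((c.toNat - 65 : Nat) : Int) - rot
          = ((Char.ofNat (c.toNat + 32)).toNat : Int) - (97 : Int) - rot := by
        rw [hlnat]; omega
      rw [if_pos (by simp [halpha]), if_neg hnotl,
          if_pos (show 'A' ≤ c ∧ c ≤ 'Z' from
            ⟨(charLe 'A' c).2 (by rw [e65]; omega), (charLe c 'Z').2 (by rw [e90]; omega)⟩),
          hcast, pvDec_get rot (c.toNat - 65) (by omega), harg]
      simp [hu, hlow]
    · have halpha : PySem.Chars.isalpha c = false := by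
        simp [PySem.Chars.isalpha, hu, hl]
      have hlF := hl; have huF := hu
      simp [PySem.Chars.islower, charLe] at hlF
      simp [PySem.Chars.isupper, charLe] at huF
      have hnotl : ¬ ('a' ≤ c ∧ c ≤ 'z') := by simp only [charLe, e97, e122]; omega
      have hnotu : ¬ ('A' ≤ c ∧ c ≤ 'Z') := by simp only [charLe, e65, e90]; omega
      rw [if_neg (by simp [halpha]), if_neg hnotl, if_neg hnotu]

lemma pvGA_odd (rot n : Int) (c : Char) (h : ¬ PySem.Int.mod n 2 = 0) :
    pvGA rot (n, c) = [c] := by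
  unfold pvGA
  rw [if_neg (by simp only [Bool.and_eq_true, beq_iff_eq]; exact fun hh => h hh.1)]

lemma pvFlatA (rot : Int) (t : List Char) : ∀ n : Int, PySem.Int.mod n 2 = 0 →
    (PySem.List.enumerate t n).flatMap (pvGA rot) = pvJ rot t := by
  induction t using pvEvery2.induct with
  | case1 => intro n h; simp [PySem.List.enumerate_nil, pvJ]
  | case2 a =>
    intro n h
    simp only [PySem.List.enumerate_cons, PySem.List.enumerate_nil, List.flatMap_cons,
      List.flatMap_nil, List.append_nil, pvGA_even rot n a h]
    rfl
  | case3 a b t ih =>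
    intro n h
    have hm := PySem.Int.mod_eq_emod_of_pos (a := n) (b := 2) (by norm_num)
    have hm1 : ¬ PySem.Int.mod (n + 1) 2 = 0 := by
      rw [PySem.Int.mod_eq_emod_of_pos (by norm_num)]
      rw [hm] at h; omega
    have hm2 : PySem.Int.mod (n + 1 + 1) 2 = 0 := by
      rw [PySem.Int.mod_eq_emod_of_pos (by norm_num)]
      rw [hm] at h; omega
    rw [PySem.List.enumerate_cons, PySem.List.enumerate_cons]
    simp only [List.flatMap_cons]
    rw [pvGA_even rot n a h, pvGA_odd rot (n + 1) b hm1, ih (n + 1 + 1) hm2]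
    rfl

lemma pvEvery2_tail {α : Type} (b : α) (t : List α) :
    pvEvery2 (b :: t) = b :: pvEvery2 t.tail := by
  cases t <;> rfl

lemma pvFilt {α : Type} (xs : List α) :
    (List.range ((xs.length + 1) / 2)).filterMap (fun k => xs[2 * k]?) = pvEvery2 xs := by
  induction xs using pvEvery2.induct with
  | case1 => simp [pvEvery2]
  | case2 a => simp [pvEvery2, List.range_succ]
  | case3 a b t ih =>
    have hlen : ((a :: b :: t).length + 1) / 2 = (t.length + 1) / 2 + 1 := by
      simp only [List.length_cons]; omega
    rw [hlen, List.range_succ_eq_map, List.filterMap_cons]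
    simp only [List.getElem?_cons_zero, Nat.mul_zero]
    rw [List.filterMap_map]
    show _ = pvEvery2 (a :: b :: t)
    have hstep : ∀ k : Nat, ((fun k => (a :: b :: t)[2 * k]?) ∘ Nat.succ) k = (fun k => t[2 * k]?) k := by
      intro k
      have h2 : 2 * Nat.succ k = (2 * k) + 1 + 1 := by omega
      simp [Function.comp, h2]
    rw [List.filterMap_congr (by intro k _; exact hstep k), ih]
    rfl

lemma pvSliceEven {α : Type} (xs : List α) :
    PySem.List.slice? xs none none 2 = some (pvEvery2 xs) := by
  rw [← pvFilt xs]
  simp only [PySem.List.slice?, PySem.List.sliceIndices]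
  norm_num
  have h1 : ((↑xs.length + 2 - 1 : Int) / 2).toNat = (xs.length + 1) / 2 := by
    have h : (↑xs.length + 2 - 1 : Int) = ((xs.length + 1 : Nat) : Int) := by omega
    rw [h]; norm_cast
  rcases Nat.eq_zero_or_pos xs.length with h0 | h0
  · rw [if_neg (by omega)]
    have h2 : (xs.length + 1) / 2 = 0 := by omega
    simp [h2]
  · rw [if_pos h0, h1]
    have hidx : ∀ x : Nat, ((2 : Int) * ↑x).toNat = 2 * x := by intro x; omega
    exact List.filterMap_congr (by intro k _; rw [hidx k])

lemma pvSliceOdd {α : Type} (xs : List α) :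
    PySem.List.slice? xs (some 1) none 2 = some (pvEvery2 xs.tail) := by
  rw [← pvFilt xs.tail]
  simp only [PySem.List.slice?, PySem.List.sliceIndices]
  norm_num
  rcases Nat.lt_or_ge 1 xs.length with h0 | h0
  case inr =>
    rw [if_neg (by omega)]
    have h2 : (xs.length - 1 + 1) / 2 = 0 := by omega
    simp [h2]
  case inl =>
    have hmin : min 1 (↑xs.length : Int) = 1 := by omega
    have hc : ((↑xs.length - min 1 ↑xs.length + 2 - 1 : Int) / 2).toNat = (xs.length - 1 + 1) / 2 := by
      rw [hmin]
      have h : (↑xs.length - 1 + 2 - 1 : Int) = ((xs.length : Nat) : Int) := by omega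
      rw [h]
      have h4 : xs.length - 1 + 1 = xs.length := by omega
      rw [h4]; norm_cast
    rw [if_pos h0, hc]
    exact List.filterMap_congr (by intro k _; rw [hmin]; congr 1; omega)

lemma pvGet_neg_one {α : Type} (xs : List α) : PySem.List.pyGet? xs (-1) = xs.getLast? := by
  cases xs with
  | nil => simp [PySem.List.pyGet?, PySem.List.pyIdx?]
  | cons a l => simp [PySem.List.pyGet?, PySem.List.pyIdx?, List.getLast?_eq_getElem?]

lemma pvGetD_neg_one_cons {α : Type} (x d : α) (l : List α) (h : l ≠ []) :
    PySem.List.pyGetD (x :: l) (-1) d = PySem.List.pyGetD l (-1) d := by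
  simp only [PySem.List.pyGetD, pvGet_neg_one]
  have hs : l.getLast?.isSome := List.getLast?_isSome.mpr h
  obtain ⟨y, hy⟩ := Option.isSome_iff_exists.mp hs
  simp [List.getLast?_cons, hy]

lemma pvFlatB (rot : Int) (xs : List Char) :
    (if (pvEvery2 xs.tail).length < ((pvEvery2 xs).map (pvTr (pvDecTable rot))).length then
       (((pvEvery2 xs).map (pvTr (pvDecTable rot))).zip (pvEvery2 xs.tail)).flatMap (fun p => [p.1, p.2])
         ++ [PySem.List.pyGetD ((pvEvery2 xs).map (pvTr (pvDecTable rot))) (-1) 'a']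
     else (((pvEvery2 xs).map (pvTr (pvDecTable rot))).zip (pvEvery2 xs.tail)).flatMap (fun p => [p.1, p.2]))
    = pvJ rot xs := by
  induction xs using pvEvery2.induct with
  | case1 => simp [pvEvery2, pvJ]
  | case2 a => simp [pvEvery2, pvJ, PySem.List.pyGetD, pvGet_neg_one]
  | case3 a b t ih =>
    have h1 : pvEvery2 (a :: b :: t) = a :: pvEvery2 t := rfl
    have h2 : (a :: b :: t).tail = b :: t := rfl
    rw [h1, h2, pvEvery2_tail]
    simp only [List.map_cons, List.zip_cons_cons, List.flatMap_cons, List.length_cons]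
    show (if _ then _ else _) = pvTr (pvDecTable rot) a :: b :: pvJ rot t
    by_cases hc : (pvEvery2 t.tail).length < ((pvEvery2 t).map (pvTr (pvDecTable rot))).length
    · rw [if_pos hc] at ih
      rw [if_pos (by omega)]
      have hne : (pvEvery2 t).map (pvTr (pvDecTable rot)) ≠ [] := by
        intro hh; rw [hh] at hc; simp at hc
      rw [pvGetD_neg_one_cons _ _ _ hne, List.append_assoc, ih]
      simp [List.cons_append]
    · rw [if_neg hc] at ih
      rw [if_neg (by omega)]
      simp only [List.cons_append, List.nil_append, ih]

-- ===== VERDICT (by name: the statement is the Claim_ definition above) =====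
theorem decode_even_positions_spec : Claim_equal_decode_even_positions := by
  intro data rotation _
  unfold Spec_decode_even_positions decode_even_positions decode_even_positions_alt
  rw [pvSliceEven, pvSliceOdd]
  simp only [Option.getD_some]
  rw [PySem.List.foldl_congr_mem _ _ (fun acc pc => acc ++ pvGA rotation pc) ([] : List Char)
        (by intro acc x _; unfold pvGA; exact (apply_ite (fun l : List Char => acc ++ l) _ _ _).symm),
      PySem.List.foldl_append_eq_flatMap,
      PySem.List.foldl_append_eq_flatMap (g := fun p : Char × Char => [p.1, p.2])]
  simp only [List.nil_append]
  rw [pvFlatA rotation data.toList 0 (by decide), pvFlatB rotation data.toList]
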